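-- pv_equiv track=rewrite | github.com/srtk-scn/Python | BLR-Class/loops/program17.py | is_title
-- ===== SOURCE A (Python) =====
-- def is_title(s):
--     for i in range(len(s)):
--         if (i==0 or s[i-1]==' ') and \
--                 s[i]>='a' and s[i]<='z':
--             return False
--         elif (i!=0 and s[i-1]!=" ") and \
--                 s[i]>='A' and s[i]<='Z':
--             return False
--     return True
-- ===== SOURCE B (Python) =====
-- def is_title(s):
--     def word_ok(w):
--         if w and 'a' <= w[0] <= 'z':
--             return False
--         for c in w[1:]:
--             if 'A' <= c <= 'Z':
--                 return False
--         return True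
--     return all(word_ok(w) for w in s.split(' '))
-- ===== Notes on version B (the rewrite author's own statement) =====
-- stated objective: idiomatic
-- what changed: Replaces the flat index loop that re-reads the previous character at every position with a word-boundary decomposition: split on the single-space delimiter and check each word's first character for lowercase and its remaining characters for uppercase.
import Mathlib
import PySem

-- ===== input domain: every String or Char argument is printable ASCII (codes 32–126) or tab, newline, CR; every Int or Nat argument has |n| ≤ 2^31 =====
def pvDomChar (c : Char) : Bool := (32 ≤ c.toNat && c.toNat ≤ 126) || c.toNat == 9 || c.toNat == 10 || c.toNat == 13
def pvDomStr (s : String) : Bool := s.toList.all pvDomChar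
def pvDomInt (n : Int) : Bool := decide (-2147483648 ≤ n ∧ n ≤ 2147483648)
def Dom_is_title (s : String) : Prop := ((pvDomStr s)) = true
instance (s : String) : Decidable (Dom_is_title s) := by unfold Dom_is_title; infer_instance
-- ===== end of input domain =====

-- B replaces A's flat index-tracking pass (re-reading s[i-1] at each i) by splitting on ' ' and
-- checking each word's first/rest characters; objective: more idiomatic decomposition, same cost.

-- ===== PORT A =====
-- Python's 'a' <= c <= 'z' / 'A' <= c <= 'Z' (code-point comparison, identical on ASCII)
def pvIsLowerAZ (c : Char) : Bool := 'a' ≤ c && c ≤ 'z'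
def pvIsUpperAZ (c : Char) : Bool := 'A' ≤ c && c ≤ 'Z'

-- the 'for i in range(len(s))' loop with its two early returns; indices stay in range so getD never defaults
def isTitleGo (cs : List Char) (i : Nat) : Bool :=
  if i < cs.length then
    if (i == 0 || cs.getD (i - 1) ' ' == ' ') && pvIsLowerAZ (cs.getD i ' ') then
      false
    else if (i != 0 && cs.getD (i - 1) ' ' != ' ') && pvIsUpperAZ (cs.getD i ' ') then
      false
    else
      isTitleGo cs (i + 1)
  else
    true
termination_by cs.length - i

def is_title (s : String) : Bool := isTitleGo s.toList 0

-- ===== PORT B =====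
-- the inner helper word_ok: first char not lowercase, remaining chars (w[1:]) none uppercase
def pvWordOk (w : List Char) : Bool :=
  match w with
  | [] => true
  | c :: rest => if pvIsLowerAZ c then false else rest.all (fun d => !pvIsUpperAZ d)

def is_title_alt (s : String) : Bool :=
  (PySem.Chars.splitOn s.toList [' ']).all pvWordOk

-- ===== PRECONDITION & SPEC =====
def Spec_is_title (s : String) (out : Bool) : Prop := out = is_title_alt s
instance (s : String) (out : Bool) : Decidable (Spec_is_title s out) := by unfold Spec_is_title; infer_instance

-- ===== CLAIM (what is proved, stated in full; the proofs are below) =====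
def Claim_equal_is_title : Prop := ∀ (s : String), Dom_is_title s → Spec_is_title s (is_title s)

-- ===== LEMMAS AND PROOFS =====

-- reference form: one pass carrying 'at word start' (prev char is ' ' or i = 0)
def pvCheck (atStart : Bool) : List Char → Bool
  | [] => true
  | c :: rest =>
      if atStart && pvIsLowerAZ c then false
      else if !atStart && pvIsUpperAZ c then false
      else pvCheck (c == ' ') rest

-- simple structural form of split-on-single-space
def pvSp : List Char → List (List Char)
  | [] => [[]]
  | c :: rest => if c = ' ' then [] :: pvSp rest else (pvSp rest).modifyHead (c :: ·)

theorem pvSp_ne_nil (cs : List Char) : pvSp cs ≠ [] := by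
  cases cs with
  | nil => simp [pvSp]
  | cons c rest =>
    simp only [pvSp]
    split
    · simp
    · cases h : pvSp rest with
      | nil => exact absurd h (pvSp_ne_nil rest)
      | cons w ws => simp [List.modifyHead]

theorem pv_go_eq (l : List Char) : ∀ (fuel : Nat) (cur : List Char) (acc : List (List Char)),
    l.length ≤ fuel →
    PySem.Chars.splitOn.go [' '] fuel l cur acc
      = acc.reverse ++ (pvSp l).modifyHead (cur.reverse ++ ·) := by
  induction l with
  | nil =>
    intro fuel cur acc _
    cases fuel <;> simp [PySem.Chars.splitOn.go, pvSp]
  | cons c rest ih =>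
    intro fuel cur acc hf
    cases fuel with
    | zero => simp at hf
    | succ f =>
      simp only [List.length_cons] at hf
      by_cases hc : c = ' '
      · have hpre : [' '].isPrefixOf (c :: rest) = true := by simp [hc, List.isPrefixOf]
        rw [PySem.Chars.splitOn.go, if_pos hpre]
        simp only [List.length_singleton, List.drop_succ_cons, List.drop_zero]
        rw [ih f [] (cur.reverse :: acc) (by omega)]
        cases h : pvSp rest with
        | nil => exact absurd h (pvSp_ne_nil rest)
        | cons w ws => simp [pvSp, hc, h, List.modifyHead]
      · have hpre : [' '].isPrefixOf (c :: rest) = false := by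
          simp [List.isPrefixOf]
          exact fun h => absurd h.symm hc
        rw [PySem.Chars.splitOn.go, if_neg (by simp [hpre])]
        rw [ih f (c :: cur) acc (by omega)]
        cases h : pvSp rest with
        | nil => exact absurd h (pvSp_ne_nil rest)
        | cons w ws => simp [pvSp, hc, h, List.modifyHead]

theorem pv_splitOn_eq (cs : List Char) : PySem.Chars.splitOn cs [' '] = pvSp cs := by
  rw [PySem.Chars.splitOn, pv_go_eq cs (cs.length + 1) [] [] (by omega)]
  cases h : pvSp cs with
  | nil => exact absurd h (pvSp_ne_nil cs)
  | cons w ws => simp [List.modifyHead]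

-- B equals the reference pass
theorem pv_alt_eq_check (cs : List Char) :
    ((pvSp cs).all pvWordOk = pvCheck true cs)
    ∧ ((((pvSp cs).headD []).all (fun d => !pvIsUpperAZ d) && (pvSp cs).tail.all pvWordOk)
        = pvCheck false cs) := by
  induction cs with
  | nil => simp [pvSp, pvCheck, pvWordOk]
  | cons c rest ih =>
    obtain ⟨ih1, ih2⟩ := ih
    by_cases hc : c = ' '
    · subst hc
      constructor
      · simp [pvSp, pvCheck, pvWordOk, pvIsLowerAZ, ih1]
      · simp [pvSp, pvCheck, pvIsLowerAZ, pvIsUpperAZ, ih1]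
    · cases h : pvSp rest with
      | nil => exact absurd h (pvSp_ne_nil rest)
      | cons w ws =>
        have hcb : (c == ' ') = false := by simp [hc]
        constructor
        · by_cases hl : pvIsLowerAZ c = true
          · simp [pvSp, pvCheck, pvWordOk, hc, h, hl, List.modifyHead]
          · simp only [Bool.not_eq_true] at hl
            rw [h] at ih2
            simp only [List.headD_cons, List.tail_cons] at ih2
            simp [pvSp, pvCheck, pvWordOk, hc, hcb, h, hl, List.modifyHead, ← ih2]
        · by_cases hu : pvIsUpperAZ c = true
          · simp [pvSp, pvCheck, hc, h, hu, List.modifyHead]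
          · simp only [Bool.not_eq_true] at hu
            rw [h] at ih2
            simp only [List.headD_cons, List.tail_cons] at ih2
            simp [pvSp, pvCheck, hc, hcb, h, hu, List.modifyHead, ← ih2]

-- A equals the reference pass
theorem pv_go_eq_check (cs : List Char) : ∀ (i : Nat), i ≤ cs.length →
    isTitleGo cs i = pvCheck (i == 0 || cs.getD (i - 1) ' ' == ' ') (cs.drop i) := by
  intro i
  induction hn : cs.length - i using Nat.strong_induction_on generalizing i with
  | _ n ih =>
    intro hi
    by_cases h : i < cs.length
    · have hdrop : cs.drop i = cs[i] :: cs.drop (i + 1) := (List.getElem_cons_drop h).symm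
      have hgd : cs.getD i ' ' = cs[i] := List.getD_eq_getElem cs ' ' h
      rw [isTitleGo, if_pos h, hdrop, pvCheck, hgd]
      have hnot : (i != 0 && cs.getD (i - 1) ' ' != ' ') = !(i == 0 || cs.getD (i - 1) ' ' == ' ') := by
        simp [bne, Bool.not_or]
      rw [hnot]
      set a : Bool := (i == 0 || cs.getD (i - 1) ' ' == ' ') with ha
      by_cases h1 : (a && pvIsLowerAZ cs[i]) = true
      · rw [if_pos h1, if_pos h1]
      · rw [if_neg h1, if_neg h1]
        by_cases h2 : (!a && pvIsUpperAZ cs[i]) = true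
        · rw [if_pos h2, if_pos h2]
        · rw [if_neg h2, if_neg h2]
          rw [ih (cs.length - (i + 1)) (by omega) (i + 1) rfl (by omega)]
          congr 1
          simp [List.getElem?_eq_getElem h]
    · have hi' : i = cs.length := by omega
      rw [isTitleGo, if_neg h, hi', List.drop_length, pvCheck]

-- ===== VERDICT (by name: the statement is the Claim_ definition above) =====
theorem is_title_spec : Claim_equal_is_title := by
  intro s _
  unfold Spec_is_title is_title is_title_alt
  rw [pv_splitOn_eq, (pv_alt_eq_check s.toList).1,
    pv_go_eq_check s.toList 0 (by omega)]
  simp
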